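-- pv_equiv track=rewrite | github.com/cirosantilli/project-euler-solvers | solvers/579.py | _power_sums
-- ===== SOURCE A (Python) =====
-- def _power_sums(N, K):
--     """
--     Returns sums[k][t] = sum_{i=1..t} i^k for k=0..K, t=0..N.
--     sums[0][t] = t.
--     """
--     sums = [[0] * (N + 1) for _ in range(K + 1)]
--     for t in range(1, N + 1):
--         sums[0][t] = t
--         p = t
--         sums[1][t] = sums[1][t - 1] + p
--         for k in range(2, K + 1):
--             p *= t
--             sums[k][t] = sums[k][t - 1] + p
--     return sums
-- ===== SOURCE B (Python) =====
-- def _power_sums(N, K):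
--     # k-major: build each exponent's row independently as a prefix sum of powers.
--     rows = []
--     for k in range(K + 1):
--         if k == 0:
--             rows.append(list(range(N + 1)))
--         else:
--             row, s = [], 0
--             for i in range(N + 1):
--                 s += i ** k
--                 row.append(s)
--             rows.append(row)
--     return rows
-- ===== Notes on version B (the rewrite author's own statement) =====
-- stated objective: alternative
-- what changed: B is k-major instead of t-major: it builds each exponent's row independently as a running prefix sum of i**k over i (with row 0 just range(N+1)), instead of A's column-at-a-time fill that threads one incremental power variable p across all rows.
import Mathlib
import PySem

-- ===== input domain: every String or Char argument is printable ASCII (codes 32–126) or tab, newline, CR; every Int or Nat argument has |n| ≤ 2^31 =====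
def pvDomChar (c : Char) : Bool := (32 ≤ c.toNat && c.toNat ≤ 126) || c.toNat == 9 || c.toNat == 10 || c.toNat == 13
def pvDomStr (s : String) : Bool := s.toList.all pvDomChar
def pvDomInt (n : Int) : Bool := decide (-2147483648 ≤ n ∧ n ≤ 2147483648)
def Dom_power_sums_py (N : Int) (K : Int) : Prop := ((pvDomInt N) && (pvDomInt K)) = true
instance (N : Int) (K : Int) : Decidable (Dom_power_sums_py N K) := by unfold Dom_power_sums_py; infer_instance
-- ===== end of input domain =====

-- B builds the table k-major (each exponent row as its own prefix sum of powers) instead of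
-- A's t-major column fill with a threaded power variable; equal return values on Pre_.

-- ===== PORT A =====
-- sums[k][t] = v  (writes are in range inside Pre_)
def pvSetAt (sums : List (List Int)) (k t : Nat) (v : Int) : List (List Int) :=
  sums.set k ((sums.getD k []).set t v)

-- sums[k][t]  (reads are in range inside Pre_)
def pvGetAt (sums : List (List Int)) (k t : Nat) : Int :=
  (sums.getD k []).getD t 0

-- body of 'for k in range(2, K + 1)': state is (sums, p)
def pvInnerStep (t : Int) (st : List (List Int) × Int) (k : Int) : List (List Int) × Int :=
  let p2 := st.2 * t
  (pvSetAt st.1 k.toNat t.toNat (pvGetAt st.1 k.toNat (t-1).toNat + p2), p2)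

-- body of 'for t in range(1, N + 1)'
def pvOuterStep (K : Int) (sums : List (List Int)) (t : Int) : List (List Int) :=
  let sums1 := pvSetAt sums 0 t.toNat t
  let p := t
  let sums2 := pvSetAt sums1 1 t.toNat (pvGetAt sums1 1 (t-1).toNat + p)
  ((PySem.List.pyRange 2 (K+1) 1).foldl (pvInnerStep t) (sums2, p)).1

def power_sums_py (N : Int) (K : Int) : List (List Int) :=
  (PySem.List.pyRange 1 (N+1) 1).foldl (pvOuterStep K)
    ((PySem.List.pyRange 0 (K+1) 1).map (fun _ => List.replicate (N+1).toNat (0:Int)))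

-- ===== PORT B =====
-- running prefix sum: pvAccum xs s conses s + x as it walks xs (the 's += x; append(s)' loop)
def pvAccum : List Int → Int → List Int
  | [], _ => []
  | x :: xs, s => (s + x) :: pvAccum xs (s + x)

def power_sums_py_alt (N : Int) (K : Int) : List (List Int) :=
  (PySem.List.pyRange 0 (K+1) 1).map (fun k =>
    if k = 0 then PySem.List.pyRange 0 (N+1) 1
    else pvAccum ((PySem.List.pyRange 0 (N+1) 1).map (fun i => i ^ k.toNat)) 0)

-- ===== PRECONDITION & SPEC =====
-- A unconditionally writes sums[1][t] inside its loop, so it raises IndexError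
-- whenever N >= 1 and K <= 0; exactly those inputs are excluded.
def Pre_power_sums_py (N : Int) (K : Int) : Prop := N ≤ 0 ∨ 1 ≤ K
instance (N : Int) (K : Int) : Decidable (Pre_power_sums_py N K) := by
  unfold Pre_power_sums_py; infer_instance

def pvWitness_power_sums_py : Int × Int := (3, 2)

def Spec_power_sums_py (N : Int) (K : Int) (out : List (List Int)) : Prop := out = power_sums_py_alt N K
instance (N : Int) (K : Int) (out : List (List Int)) : Decidable (Spec_power_sums_py N K out) := by unfold Spec_power_sums_py; infer_instance

-- ===== CLAIM (what is proved, stated in full; the proofs are below) =====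
def Claim_equal_power_sums_py : Prop := ∀ (N : Int) (K : Int), Dom_power_sums_py N K → Pre_power_sums_py N K → Spec_power_sums_py N K (power_sums_py N K)

-- ===== LEMMAS AND PROOFS =====

-- pvS k t = sum_{i=1..t} i^k  (the intended (k,t) table entry; pvS 0 t = t, matching row 0)
def pvS (k t : Nat) : Int := ∑ i ∈ Finset.range t, ((i : Int) + 1) ^ k

lemma pvS_zero (k : Nat) : pvS k 0 = 0 := by simp [pvS]

lemma pvS_zero_t (t : Nat) : pvS 0 t = t := by simp [pvS]

lemma pvS_succ (k t : Nat) : pvS k (t+1) = pvS k t + ((t : Int) + 1) ^ k := by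
  simp [pvS, Finset.sum_range_succ]

lemma sum_map_range (f : Nat → Int) (n : Nat) :
    ((List.range n).map f).sum = ∑ i ∈ Finset.range n, f i := by
  induction n with
  | zero => simp
  | succ n ih => simp [List.range_succ, Finset.sum_range_succ, ih]

lemma pvS_eq_shift (k t : Nat) (hk : 1 ≤ k) :
    (∑ i ∈ Finset.range (t+1), (i : Int) ^ k) = pvS k t := by
  rw [Finset.sum_range_succ']
  simp [pvS, zero_pow (by omega : k ≠ 0)]

lemma pvAccum_append (l : List Int) (x a : Int) :
    pvAccum (l ++ [x]) a = pvAccum l a ++ [a + l.sum + x] := by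
  induction l generalizing a with
  | nil => simp [pvAccum]
  | cons y l ih => simp [pvAccum, ih]; ring_nf

lemma pvAccum_range (f : Nat → Int) (n : Nat) :
    pvAccum ((List.range n).map f) 0 =
      (List.range n).map (fun t => ∑ i ∈ Finset.range (t+1), f i) := by
  induction n with
  | zero => simp [pvAccum]
  | succ n ih =>
    rw [List.range_succ, List.map_append, List.map_append, List.map_cons, List.map_nil,
      pvAccum_append, ih]
    simp [sum_map_range, Finset.sum_range_succ]

lemma getD_map_range' {α : Type} (g : Nat → α) (n c : Nat) (d : α) (hc : c < n) :
    ((List.range n).map g).getD c d = g c := by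
  rw [List.getD_eq_getElem?_getD]
  simp [hc]

lemma map_range_set {α : Type} (g : Nat → α) (n c : Nat) (v : α) :
    ((List.range n).map g).set c v = (List.range n).map (fun t => if t = c then v else g t) := by
  apply List.ext_getElem
  · simp
  · intro i h1 h2
    simp only [List.getElem_set, List.getElem_map, List.getElem_range]
    split_ifs with h h' h'
    · rfl
    · omega
    · omega
    · rfl

-- the partially filled table: entry (k,t) holds pvS k t iff t ≤ m, or k < j and t = m+1
def pvMix (n K' m j : Nat) : List (List Int) :=
  (List.range K').map (fun k => (List.range n).map (fun t =>
    if t ≤ m ∨ (k < j ∧ t = m + 1) then pvS k t else 0))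

lemma pvMix_full (n K' m j : Nat) (hj : K' ≤ j) : pvMix n K' m j = pvMix n K' (m+1) 0 := by
  unfold pvMix
  refine List.map_congr_left (fun k hk => ?_)
  refine List.map_congr_left (fun t _ => ?_)
  simp only [List.mem_range] at hk
  have : (t ≤ m ∨ (k < j ∧ t = m + 1)) ↔ (t ≤ m + 1 ∨ (k < 0 ∧ t = m + 1 + 1)) := by omega
  rw [if_congr this rfl rfl]

lemma mix_get (n K' m j i : Nat) (hi : i < K') (hm : m < n) :
    pvGetAt (pvMix n K' m j) i m = pvS i m := by
  unfold pvMix pvGetAt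
  rw [getD_map_range' _ K' i [] hi, getD_map_range' _ n m 0 hm]
  simp

lemma mix_set (n K' m j : Nat) (hj : j < K') :
    pvSetAt (pvMix n K' m j) j (m+1) (pvS j (m+1)) = pvMix n K' m (j+1) := by
  unfold pvMix pvSetAt
  rw [getD_map_range' _ K' j [] hj, map_range_set, map_range_set]
  refine List.map_congr_left (fun k _ => ?_)
  by_cases hkj : k = j
  · subst hkj
    rw [if_pos rfl]
    refine congrArg (fun f => List.map f (List.range n)) (funext fun t => ?_)
    by_cases ht : t = m + 1
    · subst ht; simp
    · simp only [if_neg ht]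
      have : (t ≤ m ∨ (k < k ∧ t = m + 1)) ↔ (t ≤ m ∨ (k < k + 1 ∧ t = m + 1)) := by omega
      rw [if_congr this rfl rfl]
  · rw [if_neg hkj]
    refine congrArg (fun f => List.map f (List.range n)) (funext fun t => ?_)
    have : (k < j ∧ t = m + 1) ↔ (k < j + 1 ∧ t = m + 1) := by omega
    rw [if_congr (or_congr_right this) rfl rfl]

lemma inner_step' (n K' m j : Nat) (hn : m + 1 < n) (hjK : j + 1 < K') :
    pvInnerStep ((m+1 : Nat) : Int)
      (pvMix n K' m (j+1), ((m+1 : Nat) : Int) ^ j) ((j : Int) + 1)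
      = (pvMix n K' m (j+2), ((m+1 : Nat) : Int) ^ (j+1)) := by
  unfold pvInnerStep
  have h1 : ((j : Int) + 1).toNat = j + 1 := by omega
  have h2 : (((m+1 : Nat) : Int)).toNat = m + 1 := by omega
  have h3 : (((m+1 : Nat) : Int) - 1).toNat = m := by omega
  simp only [h1, h2, h3]
  rw [mix_get n K' m (j+1) (j+1) hjK (by omega)]
  have hp : ((m+1 : Nat) : Int) ^ j * ((m+1 : Nat) : Int) = ((m+1 : Nat) : Int) ^ (j+1) :=
    (pow_succ _ _).symm
  have hv : pvS (j+1) m + ((m+1 : Nat) : Int) ^ (j+1) = pvS (j+1) (m+1) := by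
    rw [pvS_succ]; push_cast; ring
  rw [hp, hv, mix_set n K' m (j+1) hjK]

lemma inner_fold (n K' m : Nat) (hn : m + 1 < n) (d : Nat) (hd : 2 + d ≤ K') :
    (PySem.List.pyRange 2 (2 + (d : Int)) 1).foldl (pvInnerStep ((m+1 : Nat) : Int))
      (pvMix n K' m 2, ((m+1 : Nat) : Int))
    = (pvMix n K' m (2 + d), ((m+1 : Nat) : Int) ^ (1 + d)) := by
  induction d with
  | zero =>
    rw [PySem.List.pyRange_one_eq_nil (by norm_num)]
    simp
  | succ d ih =>
    have hsplit : PySem.List.pyRange 2 (2 + ((d+1 : Nat) : Int)) 1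
        = PySem.List.pyRange 2 (2 + (d : Int)) 1 ++ [2 + (d : Int)] := by
      rw [show (2 + ((d+1 : Nat) : Int)) = (2 + (d : Int)) + 1 by push_cast; ring]
      exact PySem.List.pyRange_one_succ_right (by omega)
    rw [hsplit, List.foldl_append, ih (by omega)]
    have hstep := inner_step' n K' m (d+1) hn (by omega)
    rw [show (2 + (d : Int)) = ((d+1 : Nat) : Int) + 1 by push_cast; ring,
        show 2 + d = (d+1) + 1 by omega, show 1 + d = d + 1 by omega]
    rw [List.foldl_cons, List.foldl_nil, hstep]
    rw [show 2 + (d+1) = (d+1) + 2 by omega, show 1 + (d+1) = (d+1) + 1 by omega]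

lemma init_eq (n K' : Nat) :
    (PySem.List.pyRange 0 (K' : Int) 1).map (fun _ => List.replicate n (0:Int))
      = pvMix n K' 0 0 := by
  rw [PySem.List.pyRange_one 0 (K' : Int), List.map_map]
  unfold pvMix
  rw [show ((K' : Int) - 0).toNat = K' by omega]
  refine List.map_congr_left (fun k _ => ?_)
  apply List.ext_getElem
  · simp
  · intro i h1 h2
    simp only [Function.comp_apply, List.getElem_replicate, List.getElem_map, List.getElem_range]
    split_ifs with h
    · rcases h with h | h
      · have hi : i = 0 := by omega
        subst hi
        rw [pvS_zero]
      · omega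
    · rfl

lemma outer_step (n K' m : Nat) (K : Int) (hK : K + 1 = (K' : Int)) (hK2 : 2 ≤ K')
    (hn : m + 1 < n) :
    pvOuterStep K (pvMix n K' m 0) ((m+1 : Nat) : Int) = pvMix n K' (m+1) 0 := by
  unfold pvOuterStep
  have h2 : (((m+1 : Nat) : Int)).toNat = m + 1 := by omega
  have h3 : (((m+1 : Nat) : Int) - 1).toNat = m := by omega
  simp only [h2, h3]
  have hset0 : pvSetAt (pvMix n K' m 0) 0 (m+1) ((m+1 : Nat) : Int) = pvMix n K' m 1 := by
    rw [show ((m+1 : Nat) : Int) = pvS 0 (m+1) by rw [pvS_zero_t]]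
    exact mix_set n K' m 0 (by omega)
  rw [hset0, mix_get n K' m 1 1 (by omega) (by omega)]
  have hset1 : pvSetAt (pvMix n K' m 1) 1 (m+1) (pvS 1 m + ((m+1 : Nat) : Int))
      = pvMix n K' m 2 := by
    rw [show pvS 1 m + ((m+1 : Nat) : Int) = pvS 1 (m+1) by
      rw [pvS_succ 1 m]; push_cast; ring]
    exact mix_set n K' m 1 (by omega)
  rw [hset1, show (K + 1 : Int) = 2 + ((K' - 2 : Nat) : Int) by omega,
      inner_fold n K' m hn (K' - 2) (by omega)]
  rw [show 2 + (K' - 2) = K' by omega]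
  exact pvMix_full n K' m K' le_rfl

lemma outer_fold (n K' : Nat) (K : Int) (hK : K + 1 = (K' : Int)) (hK2 : 2 ≤ K')
    (m : Nat) (hm : m < n) :
    (PySem.List.pyRange 1 (1 + (m : Int)) 1).foldl (pvOuterStep K) (pvMix n K' 0 0)
      = pvMix n K' m 0 := by
  induction m with
  | zero =>
    rw [show (1 + ((0 : Nat) : Int)) = 1 by norm_num, PySem.List.pyRange_one_eq_nil le_rfl]
    rfl
  | succ m ih =>
    have hsplit : PySem.List.pyRange 1 (1 + ((m+1 : Nat) : Int)) 1
        = PySem.List.pyRange 1 (1 + (m : Int)) 1 ++ [1 + (m : Int)] := by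
      rw [show (1 + ((m+1 : Nat) : Int)) = (1 + (m : Int)) + 1 by push_cast; ring]
      exact PySem.List.pyRange_one_succ_right (by omega)
    rw [hsplit, List.foldl_append, ih (by omega)]
    rw [show (1 + (m : Int)) = ((m+1 : Nat) : Int) by push_cast; ring]
    exact outer_step n K' m K hK hK2 hm

lemma alt_eq (N K : Int) (hN : 0 ≤ N) (hK : 0 ≤ K) :
    power_sums_py_alt N K
      = (List.range (K+1).toNat).map (fun k => (List.range (N+1).toNat).map (fun t => pvS k t)) := by
  unfold power_sums_py_alt
  rw [PySem.List.pyRange_one 0 (K+1), List.map_map,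
      show (K + 1 - 0).toNat = (K+1).toNat by omega]
  refine List.map_congr_left (fun j _ => ?_)
  simp only [Function.comp_apply, zero_add]
  by_cases hj : j = 0
  · subst hj
    rw [if_pos (by norm_num)]
    rw [PySem.List.pyRange_one 0 (N+1),
        show (N + 1 - 0).toNat = (N+1).toNat by omega]
    refine List.map_congr_left (fun t _ => ?_)
    rw [pvS_zero_t]
    norm_num
  · rw [if_neg (by exact_mod_cast hj)]
    rw [PySem.List.pyRange_one 0 (N+1), List.map_map,
        show (N + 1 - 0).toNat = (N+1).toNat by omega]
    have hfun : ((fun i : Int => i ^ ((j : Int)).toNat) ∘ (fun k : Nat => (0 : Int) + (k : Int)))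
        = (fun t : Nat => ((t : Int)) ^ j) := by
      funext t
      simp
    rw [hfun, pvAccum_range (fun t : Nat => ((t : Int)) ^ j) (N+1).toNat]
    refine List.map_congr_left (fun t _ => ?_)
    exact pvS_eq_shift j t (by omega)

theorem power_sums_py_spec : Claim_equal_power_sums_py := by
  intro N K _ hpre
  unfold Spec_power_sums_py
  rcases le_or_gt N 0 with hN | hN
  · -- no iterations: A returns the zero table, B returns empty / [0] rows
    unfold power_sums_py
    rw [PySem.List.pyRange_one_eq_nil (by omega : (N+1 : Int) ≤ 1), List.foldl_nil]
    unfold power_sums_py_alt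
    refine (List.map_congr_left (fun k hk => ?_)).symm
    rw [PySem.List.mem_pyRange_one] at hk
    rcases lt_or_eq_of_le hN with hN0 | hN0
    · rw [show (N+1).toNat = 0 by omega]
      have hnil : PySem.List.pyRange 0 (N+1) 1 = [] :=
        PySem.List.pyRange_one_eq_nil (by omega)
      split_ifs
      · rw [hnil]; rfl
      · rw [hnil]; rfl
    · subst hN0
      split_ifs with h
      · rfl
      · have hk1 : k.toNat ≠ 0 := by omega
        show pvAccum ((PySem.List.pyRange 0 (0+1) 1).map (fun i => i ^ k.toNat)) 0
          = List.replicate ((0:Int)+1).toNat 0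
        rw [show PySem.List.pyRange 0 ((0:Int)+1) 1 = [0] from rfl]
        simp [pvAccum, zero_pow hk1]
  · have hK : 1 ≤ K := by rcases hpre with h | h <;> omega
    obtain ⟨n, hn1, hn2⟩ : ∃ n : Nat, (N+1 : Int) = (n : Int) ∧ 2 ≤ n :=
      ⟨(N+1).toNat, by omega, by omega⟩
    obtain ⟨k', hk1, hk2⟩ : ∃ k' : Nat, (K+1 : Int) = (k' : Int) ∧ 2 ≤ k' :=
      ⟨(K+1).toNat, by omega, by omega⟩
    unfold power_sums_py
    rw [alt_eq N K (by omega) (by omega), hn1, hk1]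
    simp only [Int.toNat_natCast]
    rw [init_eq n k']
    rw [show (n : Int) = 1 + ((n - 1 : Nat) : Int) by omega]
    rw [outer_fold n k' K (by omega) hk2 (n-1) (by omega)]
    unfold pvMix
    refine List.map_congr_left (fun k _ => ?_)
    refine List.map_congr_left (fun t ht => ?_)
    rw [List.mem_range] at ht
    rw [if_pos (Or.inl (by omega))]
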